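-- pv_equiv track=rewrite | github.com/AbdullaB1/leetcode | mock_interview_4/smiles.py | get_smiles
-- ===== SOURCE A (Python) =====
-- def get_smiles(s: str) -> list[list[int]]:
--     res = []
--     for i in range(2, len(s)):
--         c = s[i]
--         if (c == "(" or c == ")") and s[i - 2] == ":" and s[i - 1] == "-":
--             needed = c
--             idx = i
--             while idx + 1 < len(s) and s[idx + 1] == needed:
--                 idx += 1
--             res.append((i, idx))
--     return res
-- ===== SOURCE B (Python) =====
-- def _is_smile_start(s, a):
--     return s[a] in "()" and a >= 2 and s[a - 2] == ":" and s[a - 1] == "-"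
--
--
-- def get_smiles(s):
--     # pass 1: run-length decomposition into maximal equal-character runs
--     n = len(s)
--     runs = []
--     start = 0
--     for i in range(1, n):
--         if s[i] != s[i - 1]:
--             runs.append((start, i - 1))
--             start = i
--     if n > 0:
--         runs.append((start, n - 1))
--     # pass 2: a smile's bracket position is always a run start (it follows '-'),
--     # and the smile ends where its run ends
--     return [(a, b) for (a, b) in runs if _is_smile_start(s, a)]
-- ===== Notes on version B (the rewrite author's own statement) =====
-- stated objective: alternative
-- what changed: B replaces A's per-index pattern scan with its inner run-counting while-loop by two staged passes: a run-length decomposition of the string into maximal equal-character runs, then a filter keeping runs whose start is a bracket with the colon-hyphen prefix before it (correct because the hyphen before the bracket forces every match position to be a run start, and the smile ends where its run ends).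
import Mathlib
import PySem

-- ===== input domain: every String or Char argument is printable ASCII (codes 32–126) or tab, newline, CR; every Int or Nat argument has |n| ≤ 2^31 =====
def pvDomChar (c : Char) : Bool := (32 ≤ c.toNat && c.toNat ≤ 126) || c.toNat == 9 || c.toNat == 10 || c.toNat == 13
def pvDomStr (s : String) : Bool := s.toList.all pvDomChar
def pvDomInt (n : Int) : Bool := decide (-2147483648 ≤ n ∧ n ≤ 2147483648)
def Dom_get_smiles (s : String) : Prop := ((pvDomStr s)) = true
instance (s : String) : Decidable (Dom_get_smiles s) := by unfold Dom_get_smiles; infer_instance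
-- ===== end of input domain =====

-- B replaces A's per-index pattern scan (with its inner run-counting while) by two staged
-- passes: a run-length decomposition into maximal equal-character runs, then a filter of
-- the runs; objective: alternative (same linear cost, different decomposition).
-- Loops are ported as fuel recursion; fuel l.length dominates every loop's step count
-- (each loop advances its index by ≥ 1 and stops before l.length), so it is exact.

-- ===== PORT A =====
-- A's inner while: while idx + 1 < len(s) and s[idx+1] == needed: idx += 1
def runA (l : List Char) (needed : Char) : Nat → Nat → Nat
  | 0, idx => idx
  | fuel + 1, idx =>
    if idx + 1 < l.length ∧ l.getD (idx + 1) ' ' = needed then runA l needed fuel (idx + 1)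
    else idx

-- A's for loop over range(2, len(s)); every index read is in range, so getD is exact
def loopA (l : List Char) : Nat → Nat → List (Int × Int) → List (Int × Int)
  | 0, _, res => res
  | fuel + 1, i, res =>
    if i < l.length then
      let c := l.getD i ' '
      let res' :=
        if (c = '(' ∨ c = ')') ∧ l.getD (i - 2) ' ' = ':' ∧ l.getD (i - 1) ' ' = '-' then
          res ++ [((i : Int), (runA l c l.length i : Int))]
        else res
      loopA l fuel (i + 1) res'
    else res

def get_smiles (s : String) : List (Int × Int) :=
  loopA s.toList s.toList.length 2 []

-- ===== PORT B =====
-- Source B's helper _is_smile_start (s[a] in "()" and a >= 2 and s[a-2] == ":" and s[a-1] == "-")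
def isSmileStart (l : List Char) (a : Nat) : Bool :=
  (l.getD a ' ' == '(' || l.getD a ' ' == ')') && decide (2 ≤ a) &&
    l.getD (a - 2) ' ' == ':' && l.getD (a - 1) ' ' == '-'

-- Source B's pass 1: for i in range(1, n): if s[i] != s[i-1]: runs.append((start, i-1)); start = i
def loopRuns (l : List Char) : Nat → Nat → Nat → List (Nat × Nat) → Nat × List (Nat × Nat)
  | 0, _, start, runs => (start, runs)
  | fuel + 1, i, start, runs =>
    if i < l.length then
      if l.getD i ' ' ≠ l.getD (i - 1) ' ' then
        loopRuns l fuel (i + 1) i (runs ++ [(start, i - 1)])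
      else loopRuns l fuel (i + 1) start runs
    else (start, runs)

def get_smiles_alt (s : String) : List (Int × Int) :=
  let l := s.toList
  let n := l.length
  let sr := loopRuns l n 1 0 []
  let runs := if 0 < n then sr.2 ++ [(sr.1, n - 1)] else sr.2
  (runs.filter (fun p => isSmileStart l p.1)).map (fun p => ((p.1 : Int), (p.2 : Int)))

-- ===== PRECONDITION & SPEC =====
def Spec_get_smiles (s : String) (out : List (Int × Int)) : Prop := out = get_smiles_alt s
instance (s : String) (out : List (Int × Int)) : Decidable (Spec_get_smiles s out) := by unfold Spec_get_smiles; infer_instance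

-- ===== CLAIM (what is proved, stated in full; the proofs are below) =====
def Claim_equal_get_smiles : Prop := ∀ (s : String), Dom_get_smiles s → Spec_get_smiles s (get_smiles s)

-- ===== LEMMAS AND PROOFS =====

-- the match test of A at index r
def matchAt (l : List Char) (r : Nat) : Prop :=
  (l.getD r ' ' = '(' ∨ l.getD r ' ' = ')') ∧ l.getD (r - 2) ' ' = ':' ∧ l.getD (r - 1) ' ' = '-'

-- A's result from index r onward, accumulator-free, with explicit fuel
def AfromF (l : List Char) : Nat → Nat → List (Int × Int)
  | 0, _ => []
  | fuel + 1, r =>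
    if r < l.length then
      (if (l.getD r ' ' = '(' ∨ l.getD r ' ' = ')') ∧ l.getD (r - 2) ' ' = ':' ∧
          l.getD (r - 1) ' ' = '-' then
        [((r : Int), (runA l (l.getD r ' ') l.length r : Int))]
      else []) ++ AfromF l fuel (r + 1)
    else []

theorem AfromF_nil (l : List Char) : ∀ fuel r, l.length ≤ r → AfromF l fuel r = [] := by
  intro fuel r h
  cases fuel with
  | zero => rfl
  | succ fuel => rw [AfromF, if_neg (by omega)]

theorem AfromF_irrel (l : List Char) :
    ∀ fuel fuel' r, l.length ≤ r + fuel → l.length ≤ r + fuel' →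
      AfromF l fuel r = AfromF l fuel' r := by
  intro fuel
  induction fuel with
  | zero =>
    intro fuel' r h h'
    rw [AfromF_nil l 0 r (by omega), AfromF_nil l fuel' r (by omega)]
  | succ fuel ih =>
    intro fuel' r h h'
    cases fuel' with
    | zero =>
      rw [AfromF_nil l (fuel + 1) r (by omega), AfromF_nil l 0 r (by omega)]
    | succ fuel' =>
      rw [AfromF, AfromF]
      by_cases hr : r < l.length
      · rw [if_pos hr, if_pos hr, ih fuel' (r + 1) (by omega) (by omega)]
      · rw [if_neg hr, if_neg hr]

-- the canonical instance: fuel l.length from position r, unfolded one step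
theorem AfromF_unfold (l : List Char) (r : Nat) (hr : r < l.length) :
    AfromF l l.length r =
      (if (l.getD r ' ' = '(' ∨ l.getD r ' ' = ')') ∧ l.getD (r - 2) ' ' = ':' ∧
          l.getD (r - 1) ' ' = '-' then
        [((r : Int), (runA l (l.getD r ' ') l.length r : Int))]
      else []) ++ AfromF l l.length (r + 1) := by
  rw [AfromF_irrel l l.length (l.length + 1) r (by omega) (by omega), AfromF, if_pos hr,
      AfromF_irrel l l.length (l.length + 1) (r + 1) (by omega) (by omega)]

theorem AfromF_step (l : List Char) (r : Nat) (h : ¬ matchAt l r) :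
    AfromF l l.length r = AfromF l l.length (r + 1) := by
  by_cases hr : r < l.length
  · rw [AfromF_unfold l r hr,
      if_neg (show ¬ ((l.getD r ' ' = '(' ∨ l.getD r ' ' = ')') ∧ l.getD (r - 2) ' ' = ':' ∧
        l.getD (r - 1) ' ' = '-') from h)]
    simp
  · rw [AfromF_nil l l.length r (by omega), AfromF_nil l l.length (r + 1) (by omega)]

theorem AfromF_skip (l : List Char) :
    ∀ d r, (∀ t, r ≤ t → t < r + d → ¬ matchAt l t) →
      AfromF l l.length r = AfromF l l.length (r + d) := by
  intro d
  induction d with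
  | zero => intro r _; rfl
  | succ d ih =>
    intro r hno
    rw [AfromF_step l r (hno r (le_refl r) (by omega)),
        ih (r + 1) (fun t ht1 ht2 => hno t (by omega) (by omega))]
    congr 1
    omega

theorem loopA_eq (l : List Char) :
    ∀ fuel i res, loopA l fuel i res = res ++ AfromF l fuel i := by
  intro fuel
  induction fuel with
  | zero => intro i res; simp [loopA, AfromF]
  | succ fuel ih =>
    intro i res
    rw [loopA, AfromF]
    by_cases hi : i < l.length
    · rw [if_pos hi, if_pos hi]
      simp only
      rw [ih (i + 1)]
      by_cases hm : (l.getD i ' ' = '(' ∨ l.getD i ' ' = ')') ∧ l.getD (i - 2) ' ' = ':' ∧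
          l.getD (i - 1) ' ' = '-'
      · rw [if_pos hm, if_pos hm]; simp
      · rw [if_neg hm, if_neg hm]; simp
    · rw [if_neg hi, if_neg hi]; simp

-- fuel irrelevance for A's inner while
theorem runA_irrel (l : List Char) (c : Char) :
    ∀ fuel fuel' idx, l.length ≤ idx + fuel → l.length ≤ idx + fuel' →
      runA l c fuel idx = runA l c fuel' idx := by
  intro fuel
  induction fuel with
  | zero =>
    intro fuel' idx h h'
    cases fuel' with
    | zero => rfl
    | succ fuel' => rw [runA, runA, if_neg (by omega)]
  | succ fuel ih =>
    intro fuel' idx h h'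
    cases fuel' with
    | zero => rw [runA, runA, if_neg (by omega)]
    | succ fuel' =>
      rw [runA, runA]
      by_cases hc : idx + 1 < l.length ∧ l.getD (idx + 1) ' ' = c
      · rw [if_pos hc, if_pos hc, ih fuel' (idx + 1) (by omega) (by omega)]
      · rw [if_neg hc, if_neg hc]

theorem runA_unfold (l : List Char) (c : Char) (idx : Nat) :
    runA l c l.length idx =
      if idx + 1 < l.length ∧ l.getD (idx + 1) ' ' = c then runA l c l.length (idx + 1)
      else idx := by
  rw [runA_irrel l c l.length (l.length + 1) idx (by omega) (by omega), runA]

-- characterization of A's inner while: it returns the end of the c-run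
theorem runA_char (l : List Char) (c : Char) :
    ∀ d a, a + d < l.length →
      (a + d + 1 = l.length ∨ l.getD (a + d + 1) ' ' ≠ c) →
      (∀ t, a < t → t ≤ a + d → l.getD t ' ' = c) →
      runA l c l.length a = a + d := by
  intro d
  induction d with
  | zero =>
    intro a h hstop _
    rw [runA_unfold, if_neg]
    · omega
    · rintro ⟨h1, h2⟩
      rcases hstop with h3 | h3
      · omega
      · exact h3 (by simpa using h2)
  | succ d ih =>
    intro a h hstop hall
    rw [runA_unfold, if_pos ⟨by omega, hall (a + 1) (by omega) (by omega)⟩]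
    have hstop' : a + 1 + d + 1 = l.length ∨ l.getD (a + 1 + d + 1) ' ' ≠ c := by
      rcases hstop with h3 | h3
      · left; omega
      · right
        intro hx
        exact h3 (by rwa [show a + 1 + d + 1 = a + (d + 1) + 1 by omega] at hx)
    have := ih (a + 1) (by omega) hstop' (fun t ht1 ht2 => hall t (by omega) (by omega))
    omega

-- B's filter-and-cast (exactly the comprehension of Source B's return)
def Fmap (l : List Char) (rs : List (Nat × Nat)) : List (Int × Int) :=
  (rs.filter (fun p => isSmileStart l p.1)).map (fun p => ((p.1 : Int), (p.2 : Int)))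

theorem Fmap_append (l : List Char) (rs ts : List (Nat × Nat)) :
    Fmap l (rs ++ ts) = Fmap l rs ++ Fmap l ts := by
  simp [Fmap]

-- Source B's helper decides exactly A's match condition
theorem isSmileStart_iff (l : List Char) (a : Nat) :
    isSmileStart l a = true ↔ matchAt l a := by
  unfold isSmileStart matchAt
  simp only [Bool.and_eq_true, Bool.or_eq_true, beq_iff_eq, decide_eq_true_eq]
  constructor
  · rintro ⟨⟨⟨h1, _⟩, h3⟩, h4⟩
    exact ⟨h1, h3, h4⟩
  · rintro ⟨h1, h3, h4⟩
    refine ⟨⟨⟨h1, ?_⟩, h3⟩, h4⟩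
    match a, h3, h4 with
    | 0, h3, h4 => rw [h3] at h4; exact absurd h4 (by decide)
    | 1, h3, h4 => rw [h3] at h4; exact absurd h4 (by decide)
    | (n + 2), _, _ => omega

theorem Fmap_singleton (l : List Char) (a b : Nat) :
    Fmap l [(a, b)] =
      if (l.getD a ' ' = '(' ∨ l.getD a ' ' = ')') ∧ l.getD (a - 2) ' ' = ':' ∧
          l.getD (a - 1) ' ' = '-' then
        [((a : Int), (b : Int))]
      else [] := by
  unfold Fmap
  by_cases h : (l.getD a ' ' = '(' ∨ l.getD a ' ' = ')') ∧ l.getD (a - 2) ' ' = ':' ∧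
      l.getD (a - 1) ' ' = '-'
  · have hb : isSmileStart l a = true := by
      rw [isSmileStart_iff]
      exact h
    rw [if_pos h]
    simp [hb]
  · have hb : isSmileStart l a = false := by
      rw [← Bool.not_eq_true, isSmileStart_iff]
      exact h
    rw [if_neg h]
    simp [hb]

-- inside a run (chars equal to the previous one) each char equals the run start's
theorem chain_eq (l : List Char) (i start : Nat)
    (h : ∀ t, start < t → t < i → l.getD t ' ' = l.getD (t - 1) ' ') :
    ∀ t, start ≤ t → t < i → l.getD t ' ' = l.getD start ' ' := by
  intro t
  induction t with
  | zero => intro h1 _; rw [Nat.le_zero.mp h1]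
  | succ t ih =>
    intro h1 h2
    rcases Nat.eq_or_lt_of_le h1 with he | hlt
    · rw [← he]
    · rw [h (t + 1) hlt h2]
      simpa using ih (by omega) (by omega)

-- a run continuation is never a match position (the char before a bracket must be '-')
theorem not_match_cont (l : List Char) (t : Nat) (ht : 1 ≤ t)
    (h : l.getD t ' ' = l.getD (t - 1) ' ') : ¬ matchAt l t := by
  rintro ⟨h1, _, h3⟩
  rw [h3] at h
  rcases h1 with h1 | h1 <;> rw [h1] at h <;> exact absurd h (by decide)

-- closing the final run (the state at loop exit) yields A's matches from `start` on
theorem terminal_eq (l : List Char) (start : Nat) (runs : List (Nat × Nat))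
    (hs : start < l.length)
    (hchain : ∀ t, start < t → t < l.length → l.getD t ' ' = l.getD (t - 1) ' ') :
    Fmap l (runs ++ [(start, l.length - 1)]) = Fmap l runs ++ AfromF l l.length start := by
  rw [Fmap_append, Fmap_singleton]
  congr 1
  rw [AfromF_unfold l start hs]
  have hskip : AfromF l l.length (start + 1) = [] := by
    rw [AfromF_skip l (l.length - (start + 1)) (start + 1)
        (fun t ht1 ht2 => not_match_cont l t (by omega)
          (hchain t (by omega) (by omega))),
      AfromF_nil l l.length _ (by omega)]
  rw [hskip, List.append_nil]
  by_cases hm : (l.getD start ' ' = '(' ∨ l.getD start ' ' = ')') ∧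
      l.getD (start - 2) ' ' = ':' ∧ l.getD (start - 1) ' ' = '-'
  · rw [if_pos hm, if_pos hm]
    have hr : runA l (l.getD start ' ') l.length start = start + (l.length - 1 - start) := by
      apply runA_char
      · omega
      · left; omega
      · intro t ht1 ht2
        exact chain_eq l l.length start hchain t (by omega) (by omega)
    rw [hr]
    congr 2
    omega
  · rw [if_neg hm, if_neg hm]

-- the main invariant: running pass 1 from state (i, start, runs) and then closing and
-- filtering yields the filtered prefix plus A's matches from `start` onward
theorem key (l : List Char) :
    ∀ fuel i start runs, l.length ≤ i + fuel → 1 ≤ i → i ≤ l.length → start < i →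
      (∀ t, start < t → t < i → l.getD t ' ' = l.getD (t - 1) ' ') →
      Fmap l ((loopRuns l fuel i start runs).2 ++
          [((loopRuns l fuel i start runs).1, l.length - 1)]) =
        Fmap l runs ++ AfromF l l.length start := by
  intro fuel
  induction fuel with
  | zero =>
    intro i start runs h h1 h2 h3 hchain
    rw [loopRuns]
    exact terminal_eq l start runs (by omega) (fun t ht1 ht2 => hchain t ht1 (by omega))
  | succ fuel ih =>
    intro i start runs h h1 h2 h3 hchain
    rw [loopRuns]
    by_cases hi : i < l.length
    · rw [if_pos hi]
      by_cases hne : l.getD i ' ' ≠ l.getD (i - 1) ' '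
      · rw [if_pos hne]
        rw [ih (i + 1) i (runs ++ [(start, i - 1)]) (by omega) (by omega) (by omega)
            (by omega) (by intro t ht1 ht2; omega)]
        rw [Fmap_append, Fmap_singleton]
        rw [AfromF_unfold l start (by omega)]
        have hskip : AfromF l l.length (start + 1) = AfromF l l.length i := by
          rw [AfromF_skip l (i - (start + 1)) (start + 1)
              (fun t ht1 ht2 => not_match_cont l t (by omega)
                (hchain t (by omega) (by omega)))]
          congr 1
          omega
        rw [hskip]
        by_cases hm : (l.getD start ' ' = '(' ∨ l.getD start ' ' = ')') ∧
      l.getD (start - 2) ' ' = ':' ∧ l.getD (start - 1) ' ' = '-'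
        · rw [if_pos hm, if_pos hm]
          have hr : runA l (l.getD start ' ') l.length start = start + (i - 1 - start) := by
            apply runA_char
            · omega
            · right
              rw [show start + (i - 1 - start) + 1 = i by omega]
              intro hx
              apply hne
              rw [hx]
              rcases Nat.eq_or_lt_of_le (show start ≤ i - 1 by omega) with he | hlt
              · rw [show i - 1 = start from he.symm]
              · exact (chain_eq l i start hchain (i - 1) (by omega) (by omega)).symm
            · intro t ht1 ht2
              exact chain_eq l i start hchain t (by omega) (by omega)
          rw [hr, show start + (i - 1 - start) = i - 1 by omega]
          simp
        · rw [if_neg hm, if_neg hm]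
          simp
      · rw [if_neg hne]
        rw [not_not] at hne
        rw [ih (i + 1) start runs (by omega) (by omega) (by omega) (by omega)
            (by intro t ht1 ht2
                by_cases ht : t = i
                · rw [ht]; exact hne
                · exact hchain t ht1 (by omega))]
    · rw [if_neg hi]
      exact terminal_eq l start runs (by omega) (fun t ht1 ht2 => hchain t ht1 (by omega))

theorem matchAt_ge_two (l : List Char) (t : Nat) : matchAt l t → 2 ≤ t := by
  rintro ⟨_, h3, h4⟩
  match t, h3, h4 with
  | 0, h3, h4 => rw [show (0 : Nat) - 1 = 0 - 2 from rfl, h3] at h4; exact absurd h4 (by decide)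
  | 1, h3, h4 => rw [show (1 : Nat) - 1 = 1 - 2 from rfl, h3] at h4; exact absurd h4 (by decide)
  | (n + 2), _, _ => omega

theorem no_match_01 (l : List Char) (t : Nat) (_ : t < 2) : ¬ matchAt l t :=
  fun h => absurd (matchAt_ge_two l t h) (by omega)

-- ===== VERDICT (by name: the statement is the Claim_ definition above) =====
theorem get_smiles_spec : Claim_equal_get_smiles := by
  intro s _
  unfold Spec_get_smiles get_smiles get_smiles_alt
  rw [loopA_eq s.toList s.toList.length 2 []]
  simp only [List.nil_append]
  by_cases hn : s.toList.length = 0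
  · rw [if_neg (by omega), AfromF_nil s.toList s.toList.length 2 (by omega)]
    rw [List.length_eq_zero_iff.mp hn]
    rfl
  · rw [if_pos (by omega)]
    have := key s.toList s.toList.length 1 0 [] (by omega) (by omega) (by omega)
      (by omega) (by intro t ht1 ht2; omega)
    rw [show Fmap s.toList [] = [] from rfl, List.nil_append] at this
    rw [show (((loopRuns s.toList s.toList.length 1 0 []).2 ++
          [((loopRuns s.toList s.toList.length 1 0 []).1, s.toList.length - 1)]).filter
            (fun p => isSmileStart s.toList p.1)).map
            (fun p => ((p.1 : Int), (p.2 : Int))) =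
        Fmap s.toList ((loopRuns s.toList s.toList.length 1 0 []).2 ++
          [((loopRuns s.toList s.toList.length 1 0 []).1, s.toList.length - 1)]) from rfl]
    rw [this, AfromF_step s.toList 0 (no_match_01 s.toList 0 (by omega)),
        AfromF_step s.toList 1 (no_match_01 s.toList 1 (by omega))]
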